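-- pv_equiv track=rewrite | github.com/ivan-ivano/LAB6.4_it | LAB6_4_it.py | last_positive_index
-- ===== SOURCE A (Python) =====
-- def last_positive_index(lst):
--     i = len(lst) - 1
--     while i >= 0:
--         if lst[i] > 0:
--             return i
--         else:
--             i -= 1
--     return None
-- ===== SOURCE B (Python) =====
-- def last_positive_index(lst):
--     result = None
--     for i, v in enumerate(lst):
--         if v > 0:
--             result = i
--     return result
-- ===== Notes on version B (the rewrite author's own statement) =====
-- stated objective: alternative
-- what changed: Replaces A's backward early-return index loop with a single forward enumerate pass keeping an accumulator that is overwritten at each positive element.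
import Mathlib
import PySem

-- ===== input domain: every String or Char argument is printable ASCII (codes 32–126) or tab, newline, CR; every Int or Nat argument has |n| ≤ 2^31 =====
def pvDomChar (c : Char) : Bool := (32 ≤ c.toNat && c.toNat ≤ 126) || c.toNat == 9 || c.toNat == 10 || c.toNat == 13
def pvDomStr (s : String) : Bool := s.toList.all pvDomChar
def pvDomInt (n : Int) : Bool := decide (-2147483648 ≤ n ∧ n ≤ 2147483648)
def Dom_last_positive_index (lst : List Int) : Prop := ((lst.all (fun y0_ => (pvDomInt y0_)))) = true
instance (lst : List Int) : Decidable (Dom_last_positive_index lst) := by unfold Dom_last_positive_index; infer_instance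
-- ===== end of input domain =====

-- B replaces A's backward early-return scan by a forward enumerate pass with an overwritten accumulator; alternative decomposition, same cost.

-- ===== PORT A =====
-- the 'while i >= 0' loop of A; i decreases by 1 each iteration
def lpiLoopA (lst : List Int) (i : Int) : Option Int :=
  if _h : i ≥ 0 then
    match PySem.List.pyGet? lst i with
    | some v => if v > 0 then some i else lpiLoopA lst (i - 1)
    | none => none      -- unreachable: 0 ≤ i < len on every call from last_positive_index
  else none
termination_by (i + 1).toNat
decreasing_by omega

def last_positive_index (lst : List Int) : Option Int :=
  lpiLoopA lst ((lst.length : Int) - 1)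

-- ===== PORT B =====
def last_positive_index_alt (lst : List Int) : Option Int :=
  (PySem.List.enumerate lst 0).foldl
    (fun result p => if p.2 > 0 then some p.1 else result) none

-- ===== PRECONDITION & SPEC =====
def Spec_last_positive_index (lst : List Int) (out : Option Int) : Prop := out = last_positive_index_alt lst
instance (lst : List Int) (out : Option Int) : Decidable (Spec_last_positive_index lst out) := by unfold Spec_last_positive_index; infer_instance

-- ===== CLAIM (what is proved, stated in full; the proofs are below) =====
def Claim_equal_last_positive_index : Prop := ∀ (lst : List Int), Dom_last_positive_index lst → Spec_last_positive_index lst (last_positive_index lst)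

-- ===== LEMMAS AND PROOFS =====

theorem lpi_enumerate_append (xs ys : List Int) (s : Int) :
    PySem.List.enumerate (xs ++ ys) s
      = PySem.List.enumerate xs s ++ PySem.List.enumerate ys (s + xs.length) := by
  induction xs generalizing s with
  | nil => simp [PySem.List.enumerate_nil]
  | cons x xs ih =>
    simp [PySem.List.enumerate_cons, ih]
    ring_nf

theorem lpi_loopA_append (lst : List Int) (x : Int) (i : Int) (h : i < (lst.length : Int)) :
    lpiLoopA (lst ++ [x]) i = lpiLoopA lst i := by
  by_cases h0 : i ≥ 0
  · have hlt : i.toNat < lst.length := by omega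
    conv_lhs => rw [lpiLoopA]
    conv_rhs => rw [lpiLoopA]
    simp only [dif_pos h0]
    rw [PySem.List.pyGet?_eq_some_getElem (lst ++ [x]) h0 (by simp; omega),
        PySem.List.pyGet?_eq_some_getElem lst h0 h]
    rw [List.getElem_append_left hlt]
    by_cases hv : lst[i.toNat] > 0
    · simp [hv]
    · simp only [hv, if_false]
      exact lpi_loopA_append lst x (i - 1) (by omega)
  · conv_lhs => rw [lpiLoopA]
    conv_rhs => rw [lpiLoopA]
    simp only [dif_neg h0]
termination_by (i + 1).toNat
decreasing_by omega

theorem lpi_main (lst : List Int) : last_positive_index lst = last_positive_index_alt lst := by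
  induction lst using List.reverseRecOn with
  | nil =>
    simp [last_positive_index, last_positive_index_alt, lpiLoopA, PySem.List.enumerate_nil]
  | append_singleton ys x ih =>
    have hB : last_positive_index_alt (ys ++ [x])
        = if x > 0 then some (ys.length : Int) else last_positive_index_alt ys := by
      unfold last_positive_index_alt
      rw [lpi_enumerate_append]
      simp [PySem.List.enumerate_cons, PySem.List.enumerate_nil, List.foldl_append]
    have hA : last_positive_index (ys ++ [x])
        = if x > 0 then some (ys.length : Int) else last_positive_index ys := by
      unfold last_positive_index
      have hlen : ((ys ++ [x]).length : Int) - 1 = (ys.length : Int) := by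
        simp
      rw [hlen, lpiLoopA]
      simp only [dif_pos (by positivity : (ys.length : Int) ≥ 0)]
      rw [show PySem.List.pyGet? (ys ++ [x]) (ys.length : Int) = some x from
        PySem.List.pyGet?_append_length ys [] x]
      show (if x > 0 then some ((ys.length : Int)) else lpiLoopA (ys ++ [x]) ((ys.length : Int) - 1)) = _
      by_cases hv : x > 0
      · simp [hv]
      · simp only [hv, if_false]
        exact lpi_loopA_append ys x _ (by omega)
    rw [hA, hB, ih]

-- ===== VERDICT (by name: the statement is the Claim_ definition above) =====
theorem last_positive_index_spec : Claim_equal_last_positive_index := by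
  intro lst _
  unfold Spec_last_positive_index
  exact lpi_main lst
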